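-- pv_equiv track=rewrite | github.com/anibal-art/roman_rubin | save_data_filtered_by_npeaks.py | find_max_overlap_with_points
-- ===== SOURCE A (Python) =====
-- def find_max_overlap_with_points(intervals, points):
--     max_overlap = 0
--     best_shift = 0
--
--     for interval in intervals:
--         for shift in [interval[0] - point for point in points]:
--             overlap = sum(1 for point in points if interval[0] - shift <= point <= interval[1] - shift)
--             if overlap > max_overlap:
--                 max_overlap = overlap
--                 best_shift = shift
--     Best_Shift = best_shift + 5
--     shifted_points = [point + Best_Shift for point in points]
--     return Best_Shift
-- ===== SOURCE B (Python) =====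
-- # B: sort the points once and count each candidate window with binary-search
-- # range queries, instead of A's O(P) scan per (interval, point) pair.
-- # (bisect re-implemented by hand since A imports no stdlib modules; it is
-- # exactly CPython's bisect_left/bisect_right.)
--
-- def _bisect_left(a, x):
--     lo, hi = 0, len(a)
--     while lo < hi:
--         mid = (lo + hi) // 2
--         if a[mid] < x:
--             lo = mid + 1
--         else:
--             hi = mid
--     return lo
--
-- def _bisect_right(a, x):
--     lo, hi = 0, len(a)
--     while lo < hi:
--         mid = (lo + hi) // 2
--         if x < a[mid]:
--             hi = mid
--         else:
--             lo = mid + 1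
--     return lo
--
-- def find_max_overlap_with_points(intervals, points):
--     if not points:
--         return 5  # no candidate shifts at all; best_shift stays 0
--     sp = sorted(points)
--     max_overlap = 0
--     best_shift = 0
--     for interval in intervals:
--         width = interval[1] - interval[0]
--         for p in points:
--             # points q with p <= q <= p + width
--             overlap = _bisect_right(sp, p + width) - _bisect_left(sp, p)
--             if overlap > max_overlap:
--                 max_overlap = overlap
--                 best_shift = interval[0] - p
--     return best_shift + 5
-- ===== Notes on version B (the rewrite author's own statement) =====
-- stated objective: faster
-- what changed: B sorts the points once and counts each shifted window with two binary-search range queries (hand-written bisect_left/bisect_right, since A imports nothing), replacing A's full O(P) scan per (interval, point) candidate shift.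
import Mathlib
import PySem

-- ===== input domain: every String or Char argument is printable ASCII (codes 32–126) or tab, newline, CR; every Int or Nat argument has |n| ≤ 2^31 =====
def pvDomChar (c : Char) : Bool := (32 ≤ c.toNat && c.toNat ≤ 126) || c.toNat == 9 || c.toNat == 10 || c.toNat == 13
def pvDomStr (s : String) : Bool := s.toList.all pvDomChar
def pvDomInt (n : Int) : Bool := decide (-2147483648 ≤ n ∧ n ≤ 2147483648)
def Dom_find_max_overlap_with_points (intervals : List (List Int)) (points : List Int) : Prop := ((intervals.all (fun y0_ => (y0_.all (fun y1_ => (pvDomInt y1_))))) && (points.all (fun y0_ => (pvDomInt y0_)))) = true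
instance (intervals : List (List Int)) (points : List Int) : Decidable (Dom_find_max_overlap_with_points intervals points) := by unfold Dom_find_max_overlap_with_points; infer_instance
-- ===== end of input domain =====

-- B replaces A's O(P) inner scan per (interval, point) pair by binary-search
-- range queries on the points sorted once (alternative exact algorithm).


-- ===== PORT A =====
-- literal port of A: for every interval, for every candidate shift interval[0]-point,
-- count the points inside the shifted window by a full scan (sum of 1s = countP),
-- keep (max_overlap, best_shift) under strict improvement; return best_shift + 5.
-- (A also builds an unused list `shifted_points`; it has no effect and is not kept.)
def find_max_overlap_with_points (intervals : List (List Int)) (points : List Int) : Int :=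
  let st :=
    intervals.foldl (fun (st : Int × Int) interval =>
      (points.map (fun point => PySem.List.pyGetD interval 0 0 - point)).foldl
        (fun (st : Int × Int) shift =>
          let overlap : Int :=
            ((points.countP (fun point =>
              decide (PySem.List.pyGetD interval 0 0 - shift ≤ point ∧ point ≤ PySem.List.pyGetD interval 1 0 - shift))) : Int)
          if overlap > st.1 then (overlap, shift) else st) st) (0, 0)
  st.2 + 5

-- ===== PORT B =====
-- literal port of Source B: early return for no points; sort the points once; per
-- (interval, point) count via bisect_right/bisect_left on the sorted list
-- (Source B's hand-written _bisect_left/_bisect_right are exactly CPython's bisect,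
-- ported as PySem.List.bisectLeft/bisectRight, the same binary-search loop).
def find_max_overlap_with_points_alt (intervals : List (List Int)) (points : List Int) : Int :=
  if points.isEmpty then 5
  else
    let sp := PySem.List.sorted points id
    let st :=
      intervals.foldl (fun (st : Int × Int) interval =>
        let width := PySem.List.pyGetD interval 1 0 - PySem.List.pyGetD interval 0 0
        points.foldl (fun (st : Int × Int) p =>
          let overlap : Int :=
            ((PySem.List.bisectRight sp (p + width) : Nat) : Int)
              - ((PySem.List.bisectLeft sp p : Nat) : Int)
          if overlap > st.1 then (overlap, PySem.List.pyGetD interval 0 0 - p) else st) st) (0, 0)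
    st.2 + 5

-- ===== PRECONDITION & SPEC =====
-- Pre_ excludes exactly the inputs on which A raises IndexError: a nonempty
-- points list together with some interval of length < 2 (A reads interval[0]
-- and interval[1] for every interval once points is nonempty).
def Pre_find_max_overlap_with_points (intervals : List (List Int)) (points : List Int) : Prop :=
  points = [] ∨ ∀ iv ∈ intervals, 2 ≤ iv.length
instance (intervals : List (List Int)) (points : List Int) : Decidable (Pre_find_max_overlap_with_points intervals points) := by unfold Pre_find_max_overlap_with_points; infer_instance
def pvWitness_find_max_overlap_with_points : List (List Int) × List Int := ([[1, 3], [10, 11]], [0, 2, 5])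

def Spec_find_max_overlap_with_points (intervals : List (List Int)) (points : List Int) (out : Int) : Prop := out = find_max_overlap_with_points_alt intervals points
instance (intervals : List (List Int)) (points : List Int) (out : Int) : Decidable (Spec_find_max_overlap_with_points intervals points out) := by unfold Spec_find_max_overlap_with_points; infer_instance

-- ===== CLAIM (what is proved, stated in full; the proofs are below) =====
def Claim_equal_find_max_overlap_with_points : Prop := ∀ (intervals : List (List Int)) (points : List Int), Dom_find_max_overlap_with_points intervals points → Pre_find_max_overlap_with_points intervals points → Spec_find_max_overlap_with_points intervals points (find_max_overlap_with_points intervals points)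

-- ===== LEMMAS AND PROOFS =====

theorem countP_split (l : List Int) (p : Int → Bool) (r : Nat) (hr : r ≤ l.length)
    (h1 : ∀ j (hj : j < l.length), j < r → p l[j] = true)
    (h2 : ∀ j (hj : j < l.length), r ≤ j → p l[j] = false) :
    l.countP p = r := by
  have hsplit : l.countP p = (l.take r).countP p + (l.drop r).countP p := by
    conv_lhs => rw [← List.take_append_drop r l]
    rw [List.countP_append]
  rw [hsplit]
  have htake : (l.take r).countP p = r := by
    have hall : ∀ a ∈ l.take r, p a = true := by
      intro a ha
      obtain ⟨i, hi, rfl⟩ := List.mem_iff_getElem.1 ha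
      have hlen : (l.take r).length = r := by simp [List.length_take]; omega
      have hir : i < r := by omega
      have : (l.take r)[i] = l[i]'(by omega) := List.getElem_take
      rw [this]
      exact h1 i (by omega) hir
    rw [List.countP_eq_length.2 hall]
    simp [List.length_take]; omega
  have hdrop : (l.drop r).countP p = 0 := by
    apply List.countP_eq_zero.2
    intro a ha
    obtain ⟨i, hi, rfl⟩ := List.mem_iff_getElem.1 ha
    have hlen : (l.drop r).length = l.length - r := by simp
    have : (l.drop r)[i] = l[r + i]'(by omega) := List.getElem_drop
    rw [this]
    simp [h2 (r+i) (by omega) (by omega)]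
  omega

theorem bisectLeft_count (sp : List Int) (x : Int)
    (hs : List.Pairwise (· ≤ ·) sp) :
    PySem.List.bisectLeft sp x = sp.countP (fun a => decide (a < x)) := by
  obtain ⟨hle, h1, h2⟩ := PySem.List.bisectLeft_spec sp x hs
  symm
  apply countP_split sp _ _ hle
  · intro j hj hjr; simp [h1 j hj hjr]
  · intro j hj hjr; simp; exact h2 j hj hjr

theorem bisectRight_count (sp : List Int) (x : Int)
    (hs : List.Pairwise (· ≤ ·) sp) :
    PySem.List.bisectRight sp x = sp.countP (fun a => decide (a ≤ x)) := by
  obtain ⟨hle, h1, h2⟩ := PySem.List.bisectRight_spec sp x hs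
  symm
  apply countP_split sp _ _ hle
  · intro j hj hjr; simp [h1 j hj hjr]
  · intro j hj hjr; simp; exact h2 j hj hjr

theorem count_window (l : List Int) (p w : Int) (hw : 0 ≤ w) :
    l.countP (fun a => decide (a ≤ p + w)) =
      l.countP (fun a => decide (a < p)) + l.countP (fun q => decide (p ≤ q ∧ q ≤ p + w)) := by
  induction l with
  | nil => simp
  | cons a t ih =>
    simp only [Bool.decide_and] at ih ⊢
    rw [List.countP_cons, List.countP_cons, List.countP_cons, ih]
    by_cases h2 : a < p
    · have hpn : ¬ p ≤ a := by omega
      by_cases h1 : a ≤ p + w <;> simp [h1, h2, hpn] <;> omega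
    · have hpa : p ≤ a := by omega
      by_cases h1 : a ≤ p + w
      · have hy : p ≤ a ∧ a ≤ p + w := ⟨hpa, h1⟩
        simp [h1, h2, hy]
        omega
      · simp [h1, h2, hpa]

theorem count_window_neg (l : List Int) (p w : Int) (hw : w < 0) :
    l.countP (fun q => decide (p ≤ q ∧ q ≤ p + w)) = 0 ∧
      l.countP (fun a => decide (a ≤ p + w)) ≤ l.countP (fun a => decide (a < p)) := by
  constructor
  · apply List.countP_eq_zero.2; intro a _; simp; omega
  · apply List.countP_mono_left; intro a _; simp; omega

theorem cnt_rel (points : List Int) (iv0 iv1 p : Int) :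
    ((points.countP (fun q => decide (iv0 - (iv0 - p) ≤ q ∧ q ≤ iv1 - (iv0 - p))) : Int)
      = ((PySem.List.bisectRight (PySem.List.sorted points id) (p + (iv1 - iv0)) : Nat) : Int)
          - ((PySem.List.bisectLeft (PySem.List.sorted points id) p : Nat) : Int))
    ∨ ((points.countP (fun q => decide (iv0 - (iv0 - p) ≤ q ∧ q ≤ iv1 - (iv0 - p))) = 0)
        ∧ ((PySem.List.bisectRight (PySem.List.sorted points id) (p + (iv1 - iv0)) : Nat) : Int)
            - ((PySem.List.bisectLeft (PySem.List.sorted points id) p : Nat) : Int) ≤ 0) := by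
  set w := iv1 - iv0 with hw
  set sp := PySem.List.sorted points id with hsp
  have hpair : List.Pairwise (· ≤ ·) sp := by
    have := PySem.List.sorted_pairwise points id
    simpa using this
  have hperm : sp.Perm points := PySem.List.sorted_perm points id false
  have hA : points.countP (fun q => decide (iv0 - (iv0 - p) ≤ q ∧ q ≤ iv1 - (iv0 - p)))
      = points.countP (fun q => decide (p ≤ q ∧ q ≤ p + w)) := by
    apply List.countP_congr
    intro a _
    constructor <;> · intro h; simp at h ⊢; omega
  have hbr : PySem.List.bisectRight sp (p + w) = points.countP (fun a => decide (a ≤ p + w)) := by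
    rw [bisectRight_count sp (p + w) hpair, hperm.countP_eq]
  have hbl : PySem.List.bisectLeft sp p = points.countP (fun a => decide (a < p)) := by
    rw [bisectLeft_count sp p hpair, hperm.countP_eq]
  rcases le_or_gt 0 w with hw0 | hw0
  · left
    rw [hA, hbr, hbl, count_window points p w hw0]
    push_cast; ring
  · right
    obtain ⟨h0, hle⟩ := count_window_neg points p w hw0
    refine ⟨by rw [hA, h0], ?_⟩
    rw [hbr, hbl]
    omega

def gA (points : List Int) (interval : List Int) (st : Int × Int) (shift : Int) : Int × Int :=
  let overlap : Int :=
    ((points.countP (fun point =>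
      decide (PySem.List.pyGetD interval 0 0 - shift ≤ point ∧ point ≤ PySem.List.pyGetD interval 1 0 - shift))) : Int)
  if overlap > st.1 then (overlap, shift) else st

def gB (points : List Int) (interval : List Int) (st : Int × Int) (p : Int) : Int × Int :=
  let overlap : Int :=
    ((PySem.List.bisectRight (PySem.List.sorted points id)
        (p + (PySem.List.pyGetD interval 1 0 - PySem.List.pyGetD interval 0 0)) : Nat) : Int)
      - ((PySem.List.bisectLeft (PySem.List.sorted points id) p : Nat) : Int)
  if overlap > st.1 then (overlap, PySem.List.pyGetD interval 0 0 - p) else st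

theorem step_g (points iv : List Int) (p : Int) (st : Int × Int) (hst : 0 ≤ st.1) :
    gA points iv st (PySem.List.pyGetD iv 0 0 - p) = gB points iv st p
      ∧ 0 ≤ (gA points iv st (PySem.List.pyGetD iv 0 0 - p)).1 := by
  unfold gA gB
  constructor
  · rcases cnt_rel points (PySem.List.pyGetD iv 0 0) (PySem.List.pyGetD iv 1 0) p with h | ⟨h0, hneg⟩
    · simp only [h]
    · simp only []
      rw [if_neg (by simp only [h0, Nat.cast_zero]; omega), if_neg (by omega)]
  · simp only []
    split
    · positivity
    · exact hst

theorem inner_g (points iv l : List Int) (st : Int × Int) (hst : 0 ≤ st.1) :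
    (l.foldl (fun st p => gA points iv st (PySem.List.pyGetD iv 0 0 - p)) st
      = l.foldl (gB points iv) st)
    ∧ 0 ≤ (l.foldl (fun st p => gA points iv st (PySem.List.pyGetD iv 0 0 - p)) st).1 := by
  induction l generalizing st with
  | nil => exact ⟨rfl, hst⟩
  | cons p t ih =>
    obtain ⟨hse, hsn⟩ := step_g points iv p st hst
    refine ⟨?_, ?_⟩
    · rw [List.foldl_cons, List.foldl_cons, ← hse]
      exact (ih _ hsn).1
    · rw [List.foldl_cons]
      exact (ih _ hsn).2

theorem outer_g (points : List Int) (intervals : List (List Int)) (st : Int × Int) (hst : 0 ≤ st.1) :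
    (intervals.foldl (fun st iv =>
        (points.map (fun point => PySem.List.pyGetD iv 0 0 - point)).foldl (gA points iv) st) st
      = intervals.foldl (fun st iv => points.foldl (gB points iv) st) st)
    ∧ 0 ≤ (intervals.foldl (fun st iv =>
        (points.map (fun point => PySem.List.pyGetD iv 0 0 - point)).foldl (gA points iv) st) st).1 := by
  induction intervals generalizing st with
  | nil => exact ⟨rfl, hst⟩
  | cons iv t ih =>
    have hmap : (points.map (fun point => PySem.List.pyGetD iv 0 0 - point)).foldl (gA points iv) st
        = points.foldl (fun st p => gA points iv st (PySem.List.pyGetD iv 0 0 - p)) st :=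
      List.foldl_map
    obtain ⟨hie, hin⟩ := inner_g points iv points st hst
    refine ⟨?_, ?_⟩
    · rw [List.foldl_cons, List.foldl_cons, hmap, ← hie]
      exact (ih _ hin).1
    · rw [List.foldl_cons, hmap]
      exact (ih _ hin).2

-- ===== VERDICT (by name: the statement is the Claim_ definition above) =====
theorem find_max_overlap_with_points_spec : Claim_equal_find_max_overlap_with_points := by
  intro intervals points _ _
  unfold Spec_find_max_overlap_with_points
  by_cases hp : points.isEmpty = true
  · have hpts : points = [] := List.isEmpty_iff.mp hp
    subst hpts
    unfold find_max_overlap_with_points find_max_overlap_with_points_alt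
    simp [List.foldl_fixed]
  · unfold find_max_overlap_with_points find_max_overlap_with_points_alt
    rw [if_neg hp]
    show (intervals.foldl (fun st iv =>
        (points.map (fun point => PySem.List.pyGetD iv 0 0 - point)).foldl (gA points iv) st) ((0:Int),(0:Int))).2 + 5
      = (intervals.foldl (fun st iv => points.foldl (gB points iv) st) ((0:Int),(0:Int))).2 + 5
    rw [(outer_g points intervals (0, 0) le_rfl).1]
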